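-- pv_equiv track=rewrite | github.com/louisronron/pynetcal | pynetcal/ipv4pynetcal.py | is_bin
-- ===== SOURCE A (Python) =====
-- def is_bin(address):
--     """Validates that a binary IPv4Address
--     passed is valid, returns Boolean
--     """
--     # there must be 3 dots in the address.
--     if(not (address.count(".") == 3)):
--         return False
--
--
--     # each octet must contain only 1s and 0s
--     oct1, oct2, oct3, oct4 = address.split(".")
--     octets = [oct1, oct2, oct3, oct4]
--     acceptable_ch = ['0', '1']
--     for octet in octets:
--
--         # length of each octet should not be >8 or be <=0
--         if(len(octet)<=0 or len(octet)>8):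
--             return False
--
--         for ch in octet:
--             if(ch not in acceptable_ch):
--                 return False
--
--     # we're good.
--     return True
-- ===== SOURCE B (Python) =====
-- def is_bin(address):
--     """Validates that a binary IPv4Address passed is valid, returns Boolean.
--
--     Single left-to-right scan with a tiny state machine: `dots` counts the
--     separators seen, `run` the length of the current octet.
--     """
--     dots = 0
--     run = 0
--     for ch in address:
--         if ch == '.':
--             if not (1 <= run <= 8):
--                 return False
--             dots += 1
--             run = 0
--         elif ch == '0' or ch == '1':
--             run += 1
--         else:
--             return False
--     return dots == 3 and 1 <= run <= 8
-- ===== Notes on version B (the rewrite author's own statement) =====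
-- stated objective: alternative
-- what changed: Replaces A's count-dots / split / nested loops over octets with a single left-to-right scan of the string driving a two-counter state machine (dots seen, current octet length).
import Mathlib
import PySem

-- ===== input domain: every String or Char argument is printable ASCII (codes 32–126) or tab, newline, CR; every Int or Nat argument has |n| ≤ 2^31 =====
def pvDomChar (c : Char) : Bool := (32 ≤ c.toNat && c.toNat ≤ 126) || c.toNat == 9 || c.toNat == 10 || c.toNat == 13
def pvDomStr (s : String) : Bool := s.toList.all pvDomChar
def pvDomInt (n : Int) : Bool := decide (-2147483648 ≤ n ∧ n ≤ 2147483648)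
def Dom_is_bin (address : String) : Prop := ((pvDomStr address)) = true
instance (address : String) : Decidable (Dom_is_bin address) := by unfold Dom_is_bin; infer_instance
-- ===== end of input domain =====

-- B replaces A's count-dots / split('.') / nested octet loops by one left-to-right scan of the
-- string with a two-counter state machine (alternative structure; no speed claim).

-- ===== PORT A =====
-- inner loop: 'for ch in octet: if ch not in acceptable_ch: return False'

def pvCheckChars : List Char → Bool
  | [] => true
  | c :: t => if ¬(c = '0' ∨ c = '1') then false else pvCheckChars t

-- outer loop: 'for octet in octets: …' with its two early returns

def pvCheckOctets : List String → Bool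
  | [] => true
  | o :: rest =>
    if PySem.Str.len o ≤ 0 ∨ 8 < PySem.Str.len o then false
    else if pvCheckChars o.toList then pvCheckOctets rest else false

def is_bin (address : String) : Bool :=
  if ¬(PySem.Str.count address "." == 3) then false
  else
    match PySem.Str.split? address "." with
    | some [o1, o2, o3, o4] => pvCheckOctets [o1, o2, o3, o4]
    | _ => false  -- unreachable: count('.') == 3 guarantees split('.') yields exactly 4 parts (Python's 4-way unpack would raise otherwise)

-- ===== PORT B =====
-- the scan: dots = separators seen so far, run = length of the current octet

def pvBLoop : List Char → Int → Int → Bool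
  | [], dots, run => dots == 3 && decide (1 ≤ run ∧ run ≤ 8)
  | c :: rest, dots, run =>
    if c = '.' then
      if ¬(1 ≤ run ∧ run ≤ 8) then false else pvBLoop rest (dots + 1) 0
    else if c = '0' ∨ c = '1' then pvBLoop rest dots (run + 1)
    else false

def is_bin_alt (address : String) : Bool := pvBLoop address.toList 0 0

-- ===== PRECONDITION & SPEC =====
def Spec_is_bin (address : String) (out : Bool) : Prop := out = is_bin_alt address
instance (address : String) (out : Bool) : Decidable (Spec_is_bin address out) := by unfold Spec_is_bin; infer_instance

-- ===== CLAIM (what is proved, stated in full; the proofs are below) =====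
def Claim_equal_is_bin : Prop := ∀ (address : String), Dom_is_bin address → Spec_is_bin address (is_bin address)

-- ===== LEMMAS AND PROOFS =====

-- proof-side model of split('.') built front-to-back

def pvFSplit : List Char → List Char → List (List Char)
  | [], cur => [cur]
  | c :: t, cur => if c = '.' then cur :: pvFSplit t [] else pvFSplit t (cur ++ [c])

-- a valid octet, as a proposition

def pvOk (p : List Char) : Prop := 1 ≤ p.length ∧ p.length ≤ 8 ∧ ∀ c ∈ p, c = '0' ∨ c = '1'

theorem pvPrefixDot (c : Char) (t : List Char) :
    List.isPrefixOf ['.'] (c :: t) = (c == '.') := by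
  simp [List.isPrefixOf, BEq.comm]

theorem pvCountGo (l : List Char) : ∀ (fuel acc : Nat), l.length ≤ fuel →
    PySem.Chars.count.go ['.'] fuel l acc = acc + l.count '.' := by
  induction l with
  | nil =>
    intro fuel acc _
    cases fuel <;> simp [PySem.Chars.count.go]
  | cons c t ih =>
    intro fuel acc h
    cases fuel with
    | zero => simp at h
    | succ f =>
      rw [PySem.Chars.count.go, pvPrefixDot]
      simp only [List.length_cons] at h
      by_cases hc : c = '.'
      · subst hc
        simp only [BEq.rfl, if_pos, List.length_singleton, List.drop_succ_cons, List.drop_zero]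
        rw [ih f (acc + 1) (by omega)]
        simp
        omega
      · rw [if_neg (by simp [hc])]
        rw [ih f acc (by omega)]
        simp [List.count_cons, hc]

theorem pvCountDot (l : List Char) : PySem.Chars.count l ['.'] = l.count '.' := by
  rw [PySem.Chars.count]
  simp [pvCountGo l l.length 0 le_rfl]

theorem pvSplitGo (l : List Char) : ∀ (fuel : Nat) (cur : List Char) (acc : List (List Char)),
    l.length ≤ fuel →
    PySem.Chars.splitOn.go ['.'] fuel l cur acc = acc.reverse ++ pvFSplit l cur.reverse := by
  induction l with
  | nil =>
    intro fuel cur acc _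
    cases fuel <;> simp [PySem.Chars.splitOn.go, pvFSplit]
  | cons c t ih =>
    intro fuel cur acc h
    cases fuel with
    | zero => simp at h
    | succ f =>
      rw [PySem.Chars.splitOn.go, pvPrefixDot]
      simp only [List.length_cons] at h
      by_cases hc : c = '.'
      · subst hc
        simp only [BEq.rfl, if_pos, List.length_singleton, List.drop_succ_cons, List.drop_zero]
        rw [ih f [] (cur.reverse :: acc) (by omega)]
        simp [pvFSplit]
      · rw [if_neg (by simp [hc])]
        rw [ih f (c :: cur) acc (by omega)]
        rw [pvFSplit, if_neg hc]
        simp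

theorem pvSplitDot (l : List Char) : PySem.Chars.splitOn l ['.'] = pvFSplit l [] := by
  rw [PySem.Chars.splitOn]
  simpa using pvSplitGo l (l.length + 1) [] [] (by omega)

theorem pvFSplit_length (l : List Char) : ∀ cur, (pvFSplit l cur).length = l.count '.' + 1 := by
  induction l with
  | nil => intro cur; simp [pvFSplit]
  | cons c t ih =>
    intro cur
    by_cases hc : c = '.'
    · subst hc; simp [pvFSplit, ih, List.count_cons]
    · simp [pvFSplit, hc, ih, List.count_cons]

theorem pvFSplit_cur (l : List Char) : ∀ cur,
    pvFSplit l cur = (cur ++ (pvFSplit l []).headI) :: (pvFSplit l []).tail := by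
  induction l with
  | nil => intro cur; simp [pvFSplit]
  | cons c t ih =>
    intro cur
    by_cases hc : c = '.'
    · subst hc; simp [pvFSplit]
    · conv_rhs => rw [pvFSplit, if_neg hc]
      rw [pvFSplit, if_neg hc, ih (cur ++ [c]), ih ([] ++ [c])]
      simp

theorem pvCheckChars_iff (p : List Char) :
    pvCheckChars p = true ↔ ∀ c ∈ p, c = '0' ∨ c = '1' := by
  induction p with
  | nil => simp [pvCheckChars]
  | cons c t ih =>
    by_cases hc : c = '0' ∨ c = '1' <;> simp [pvCheckChars, hc, ih]

theorem pvBLoop_iff (l : List Char) : ∀ (dots run : Int),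
    pvBLoop l dots run = true ↔
      (dots + (l.count '.' : Int) = 3 ∧
       (1 ≤ run + ((pvFSplit l []).headI.length : Int) ∧
        run + ((pvFSplit l []).headI.length : Int) ≤ 8 ∧
        ∀ c ∈ (pvFSplit l []).headI, c = '0' ∨ c = '1') ∧
       ∀ p ∈ (pvFSplit l []).tail, pvOk p) := by
  induction l with
  | nil =>
    intro dots run
    simp [pvBLoop, pvFSplit]
  | cons c t ih =>
    intro dots run
    by_cases hc : c = '.'
    · subst hc
      rw [pvBLoop, if_pos rfl]
      have h4 : pvFSplit ('.' :: t) [] = [] :: pvFSplit t [] := by simp [pvFSplit]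
      rw [h4]
      obtain ⟨p, ps, hps⟩ : ∃ p ps, pvFSplit t [] = p :: ps := by
        cases h : pvFSplit t [] with
        | nil => exact absurd (congrArg List.length h) (by simp [pvFSplit_length])
        | cons a b => exact ⟨a, b, rfl⟩
      by_cases hr : 1 ≤ run ∧ run ≤ 8
      · rw [if_neg (not_not_intro hr), ih (dots + 1) 0, hps]
        simp only [List.headI, List.tail, List.count_cons, if_pos rfl, List.length_nil,
          List.forall_mem_cons, pvOk]
        constructor
        · rintro ⟨h1, ⟨hp1, hp2, hp3⟩, h3⟩
          exact ⟨by simp; omega, ⟨by omega, by omega, by simp⟩, ⟨by omega, by omega, hp3⟩, h3⟩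
        · rintro ⟨h1, ⟨_, _, _⟩, ⟨k1, k2, k3⟩, h3⟩
          exact ⟨by simp at h1; omega, ⟨by omega, by omega, k3⟩, h3⟩
      · rw [if_pos hr]
        simp only [List.headI, List.length_nil]
        constructor
        · intro h; exact absurd h (by simp)
        · rintro ⟨h1, ⟨hp1, hp2, _⟩, _⟩
          exact absurd ⟨by omega, by omega⟩ hr
    · rw [pvBLoop, if_neg hc]
      have h4 : pvFSplit (c :: t) [] = (c :: (pvFSplit t []).headI) :: (pvFSplit t []).tail := by
        rw [pvFSplit, if_neg hc, pvFSplit_cur t ([] ++ [c])]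
        simp
      rw [h4]
      by_cases hb : c = '0' ∨ c = '1'
      · rw [if_pos hb, ih dots (run + 1)]
        simp only [List.headI, List.tail, List.count_cons, if_neg hc, List.length_cons,
          List.mem_cons]
        constructor
        · rintro ⟨h1, ⟨hp1, hp2, hp3⟩, h3⟩
          refine ⟨by simpa [hc] using h1, ⟨by push_cast at *; omega, by push_cast at *; omega, ?_⟩, h3⟩
          rintro x (rfl | hx)
          · exact hb
          · exact hp3 x hx
        · rintro ⟨h1, ⟨hp1, hp2, hp3⟩, h3⟩
          refine ⟨by simpa [hc] using h1, ⟨by push_cast at *; omega, by push_cast at *; omega, ?_⟩, h3⟩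
          exact fun x hx => hp3 x (Or.inr hx)
      · rw [if_neg hb]
        simp only [List.headI]
        constructor
        · intro h; exact absurd h (by simp)
        · rintro ⟨_, ⟨_, _, hp3⟩, _⟩
          exact absurd (hp3 c (by simp)) hb

theorem pvFourParts (l : List Char) (h : l.count '.' = 3) :
    ∃ a b c d, pvFSplit l [] = [a, b, c, d] := by
  have hlen := pvFSplit_length l []
  rw [h] at hlen
  match hm : pvFSplit l [] with
  | [a, b, c, d] => exact ⟨a, b, c, d, rfl⟩
  | [] | [_] | [_, _] | [_, _, _] | _ :: _ :: _ :: _ :: _ :: _ => simp [hm] at hlen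

theorem pvOctet_iff (o : List Char) (rest : List String) :
    pvCheckOctets (String.ofList o :: rest) = true ↔
      pvOk o ∧ pvCheckOctets rest = true := by
  rw [pvCheckOctets]
  by_cases h1 : PySem.Str.len (String.ofList o) ≤ 0 ∨ 8 < PySem.Str.len (String.ofList o)
  · rw [if_pos h1]
    simp only [PySem.Str.len, String.toList_ofList] at h1
    constructor
    · intro h; exact absurd h (by simp)
    · rintro ⟨⟨k1, k2, _⟩, _⟩
      rcases h1 with h1 | h1 <;> omega
  · rw [if_neg h1]
    simp only [PySem.Str.len, String.toList_ofList] at h1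
    push Not at h1
    by_cases h2 : pvCheckChars o = true
    · rw [String.toList_ofList, if_pos h2]
      have hall := (pvCheckChars_iff o).mp h2
      simp only [pvOk]
      constructor
      · intro h; exact ⟨⟨by omega, by omega, hall⟩, h⟩
      · rintro ⟨_, h⟩; exact h
    · rw [String.toList_ofList, if_neg h2]
      simp only [Bool.false_eq_true, false_iff]
      rintro ⟨⟨_, _, k3⟩, _⟩
      exact h2 ((pvCheckChars_iff o).mpr k3)

theorem is_bin_eq (address : String) : is_bin address = is_bin_alt address := by
  unfold is_bin is_bin_alt
  have hc : PySem.Str.count address "." = List.count '.' address.toList := by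
    rw [PySem.Str.count_eq]; exact pvCountDot address.toList
  by_cases h3 : List.count '.' address.toList = 3
  · rw [if_neg (by simp [h3, pvCountDot])]
    have hsp : PySem.Str.split? address "." =
        some ((pvFSplit address.toList []).map String.ofList) := by
      rw [PySem.Str.split?]
      show Option.map _ (PySem.Chars.split? address.toList ['.']) = _
      rw [PySem.Chars.split?]
      simp [pvSplitDot]
    obtain ⟨a, b, c, d, habcd⟩ := pvFourParts address.toList h3
    rw [hsp, habcd]
    simp only [List.map_cons, List.map_nil]
    apply Bool.coe_iff_coe.mp
    rw [pvOctet_iff, pvOctet_iff, pvOctet_iff, pvOctet_iff]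
    rw [pvBLoop_iff address.toList 0 0, habcd]
    simp only [List.headI, List.tail, pvCheckOctets]
    constructor
    · rintro ⟨⟨k1, k2, k3⟩, ⟨m1, m2, m3⟩, ⟨n1, n2, n3⟩, ⟨q1, q2, q3⟩, _⟩
      refine ⟨by omega, ⟨by omega, by omega, k3⟩, ?_⟩
      simp [pvOk]
      exact ⟨⟨m1, m2, m3⟩, ⟨n1, n2, n3⟩, ⟨q1, q2, q3⟩⟩
    · rintro ⟨_, ⟨k1, k2, k3⟩, hrest⟩
      simp [pvOk] at hrest
      obtain ⟨⟨m1, m2, m3⟩, ⟨n1, n2, n3⟩, ⟨q1, q2, q3⟩⟩ := hrest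
      exact ⟨⟨by omega, by omega, k3⟩, ⟨m1, m2, m3⟩, ⟨n1, n2, n3⟩, ⟨q1, q2, q3⟩, trivial⟩
  · rw [if_pos (by simp [h3, pvCountDot])]
    cases hb : pvBLoop address.toList 0 0 with
    | false => rfl
    | true =>
      obtain ⟨e, _, _⟩ := (pvBLoop_iff address.toList 0 0).mp hb
      have h : List.count '.' address.toList = 3 := by omega
      exact absurd h h3

-- ===== VERDICT (by name: the statement is the Claim_ definition above) =====
theorem is_bin_spec : Claim_equal_is_bin := by
  intro address _
  exact is_bin_eq address
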